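-- pv_equiv track=rewrite | github.com/HuxleyBerry/advent-of-code | 2024/day5/p2.py | get_update_num
-- ===== SOURCE A (Python) =====
-- from collections import defaultdict
--
-- def get_update_num(update, pairs, adjacency_list, adjacency_list_reversed):
--     valid = True
--     for i, page1 in enumerate(update):
--         if not valid:
--             break
--         for page2 in update[i+1:]:
--             if (page2, page1) in pairs:
--                 valid = False
--                 break
--     if valid:
--         return 0
--
--     update_set = set(update)
--     al = defaultdict(set)
--     alr = defaultdict(set)
--     for page in update:
--         al[page] = adjacency_list[page].intersection(update_set)
--         alr[page] = adjacency_list_reversed[page].intersection(update_set)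
--
--     S = set(vertex for vertex in al if len(alr[vertex]) == 0)
--     toplogically_sorted = []
--     while len(S) > 0:
--         vertex = S.pop()
--         toplogically_sorted.append(vertex)
--         outneighbours = al[vertex].copy()
--         for neighbour in outneighbours:
--             al[vertex].remove(neighbour)
--             alr[neighbour].remove(vertex)
--             if len(alr[neighbour]) == 0:
--                 S.add(neighbour)
--     assert not any(len(neighbours) > 0 for neighbours in al.values())
--     return toplogically_sorted[len(update)//2]
-- ===== SOURCE B (Python) =====
-- def get_update_num(update, pairs, adjacency_list, adjacency_list_reversed):
--     n = len(update)
--     if not any((update[j], update[i]) in pairs for i in range(n) for j in range(i + 1, n)):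
--         return 0
--     half = n // 2
--     for page in update:
--         if sum(1 for q in update if (q, page) in pairs) == half:
--             return page
-- ===== Notes on version B (the rewrite author's own statement) =====
-- stated objective: simpler
-- what changed: B drops the whole Kahn topological-sort machinery (worklist set, mutated adjacency dicts, full sorted list) and instead selects the median page directly as the page whose predecessor count within the update equals len(update)//2, after an index-pair any() inversion test that reproduces A's validity check exactly.
import Mathlib
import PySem

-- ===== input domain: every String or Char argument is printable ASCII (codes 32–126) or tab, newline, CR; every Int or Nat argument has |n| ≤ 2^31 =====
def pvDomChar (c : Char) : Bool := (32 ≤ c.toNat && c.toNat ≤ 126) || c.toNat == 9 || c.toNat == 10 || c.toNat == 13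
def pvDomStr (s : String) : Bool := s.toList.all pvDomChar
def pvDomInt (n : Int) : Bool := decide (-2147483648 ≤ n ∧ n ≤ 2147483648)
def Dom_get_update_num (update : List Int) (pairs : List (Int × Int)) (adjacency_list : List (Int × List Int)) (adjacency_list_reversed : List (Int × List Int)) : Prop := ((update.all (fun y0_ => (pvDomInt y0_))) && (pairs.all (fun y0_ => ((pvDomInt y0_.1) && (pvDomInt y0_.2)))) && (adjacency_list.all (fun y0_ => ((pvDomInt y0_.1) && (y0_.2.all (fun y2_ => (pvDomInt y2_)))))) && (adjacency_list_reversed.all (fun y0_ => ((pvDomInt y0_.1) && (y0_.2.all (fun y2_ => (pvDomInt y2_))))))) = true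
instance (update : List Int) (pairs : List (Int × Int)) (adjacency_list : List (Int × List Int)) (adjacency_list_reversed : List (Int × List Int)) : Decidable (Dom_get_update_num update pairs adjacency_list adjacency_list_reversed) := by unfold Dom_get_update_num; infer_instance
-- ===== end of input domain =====

-- B replaces A's Kahn topological sort by a direct predecessor-count (rank) selection of the
-- median page; objective: simpler.  Equivalence is proved on Pre_: either the update is already
-- valid (both return 0 by the same inversion test), or the pairs restricted to the update form a
-- strict total order matched by the two adjacency dicts (the Advent-of-Code setting of A).

-- ===== PORT A =====
-- the nested validity loop with its early-exit flag
def pvAValid (update : List Int) (pairs : List (Int × Int)) : Bool :=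
  (PySem.List.enumerate update).foldl
    (fun valid ip =>
      if valid = false then valid
      else if (PySem.List.slice update (some (ip.1 + 1)) none).any
               (fun page2 => pairs.contains (page2, ip.2)) then false
      else valid)
    true

-- 'for page in update: al[page] = adjacency_list[page] & update_set; alr[page] = …'
-- (adjacency_list[page] raises KeyError when the key is missing; those inputs are outside Pre_,
--  where the '.getD []' default is never reached)
def pvBuild (update : List Int) (adjacency_list adjacency_list_reversed : List (Int × List Int)) :
    PySem.Dict Int (List Int) × PySem.Dict Int (List Int) :=
  let upset := PySem.Set.ofList update
  update.foldl
    (fun d page =>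
      (d.1.insert page (PySem.Set.inter (((PySem.Dict.mk adjacency_list).get? page).getD []) upset),
       d.2.insert page (PySem.Set.inter (((PySem.Dict.mk adjacency_list_reversed).get? page).getD []) upset)))
    (PySem.Dict.empty, PySem.Dict.empty)

-- body of 'for neighbour in outneighbours' (set.remove is exact as discard here: the removed
-- element is present on every input Pre_ admits)
def pvStep (v : Int) (st : List Int × PySem.Dict Int (List Int) × PySem.Dict Int (List Int)) (n : Int) :
    List Int × PySem.Dict Int (List Int) × PySem.Dict Int (List Int) :=
  let al' := st.2.1.modify v [] (fun s => PySem.Set.discard s n)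
  let alr' := st.2.2.modify n [] (fun s => PySem.Set.discard s v)
  let S' := if (alr'.getD n []).length = 0 then PySem.Set.add st.1 n else st.1
  (S', al', alr')

-- the 'while len(S) > 0' loop; fuel bounds the iteration count (on Pre_ the loop pops each page
-- of the update once, so update.length + 1 fuel is never exhausted); S.pop() is modelled as
-- taking the head (on Pre_ S never holds more than one element, so set-pop order cannot matter)
def pvKahn : Nat → List Int → PySem.Dict Int (List Int) → PySem.Dict Int (List Int) → List Int → List Int
  | 0, _, _, _, acc => acc
  | _ + 1, [], _, _, acc => acc
  | fuel + 1, v :: S', al, alr, acc =>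
      let st := (al.getD v []).foldl (pvStep v) (S', al, alr)
      pvKahn fuel st.1 st.2.1 st.2.2 (acc ++ [v])

-- the final 'assert' never fires on Pre_; 'toplogically_sorted[len(update)//2]' raises IndexError
-- only outside Pre_, where the pyGetD default is never reached
def get_update_num (update : List Int) (pairs : List (Int × Int)) (adjacency_list : List (Int × List Int)) (adjacency_list_reversed : List (Int × List Int)) : Int :=
  if pvAValid update pairs then 0
  else
    let d := pvBuild update adjacency_list adjacency_list_reversed
    let S := PySem.Set.ofList (d.1.keys.filter (fun v => (d.2.getD v []).length == 0))
    let ts := pvKahn (update.length + 1) S d.1 d.2 []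
    PySem.List.pyGetD ts (PySem.Int.floordiv (update.length : Int) 2) 0

-- ===== PORT B =====
-- B: one 'any' over index pairs for validity, then select the page whose predecessor count
-- (rank) equals len(update)//2 — no topological sort.  ('sum(1 for q in update if …)' is the
-- filter length; the final 'for page in update: … return page' is find?; on Pre_ a matching
-- page always exists, so the .getD 0 default is never reached.)
def get_update_num_alt (update : List Int) (pairs : List (Int × Int)) (adjacency_list : List (Int × List Int)) (adjacency_list_reversed : List (Int × List Int)) : Int :=
  let n : Int := (update.length : Int)
  if !((PySem.List.pyRange 0 n 1).any (fun i =>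
        (PySem.List.pyRange (i + 1) n 1).any (fun j =>
          pairs.contains (PySem.List.pyGetD update j 0, PySem.List.pyGetD update i 0))))
  then 0
  else
    let half := PySem.Int.floordiv n 2
    (update.find? (fun page =>
        ((update.filter (fun q => pairs.contains (q, page))).length : Int) == half)).getD 0

-- ===== PRECONDITION & SPEC =====
-- Pre_ admits (a) every already-valid update (A returns 0 before touching the dicts), and
-- (b) invalid updates whose pairs form a strict total order on the update's distinct pages,
-- with both adjacency dicts defined on those pages and matching pairs on them (the function's
-- intended input).  Excluded are invalid updates whose pairs are NOT such an order: there A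
-- either raises (KeyError/AssertionError/IndexError) or returns a value that depends on
-- CPython's set iteration order, and B's rank selection may pick a different page.
def Pre_get_update_num (update : List Int) (pairs : List (Int × Int)) (adjacency_list : List (Int × List Int)) (adjacency_list_reversed : List (Int × List Int)) : Prop :=
  (∀ j : Nat, j < update.length → ∀ i : Nat, i < j →
      (update.getD j 0, update.getD i 0) ∉ pairs) ∨
  (update.Nodup ∧
   (∀ p ∈ update, (p, p) ∉ pairs) ∧
   (∀ p ∈ update, ∀ q ∈ update, p ≠ q → (p, q) ∈ pairs ∨ (q, p) ∈ pairs) ∧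
   (∀ p ∈ update, ∀ q ∈ update, ∀ r ∈ update, (p, q) ∈ pairs → (q, r) ∈ pairs → (p, r) ∈ pairs) ∧
   (∀ p ∈ update,
      ((PySem.Dict.mk adjacency_list).get? p).isSome = true ∧
      (((PySem.Dict.mk adjacency_list).get? p).getD []).Nodup ∧
      (∀ q ∈ update, q ∈ ((PySem.Dict.mk adjacency_list).get? p).getD [] ↔ (p, q) ∈ pairs)) ∧
   (∀ p ∈ update,
      ((PySem.Dict.mk adjacency_list_reversed).get? p).isSome = true ∧
      (((PySem.Dict.mk adjacency_list_reversed).get? p).getD []).Nodup ∧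
      (∀ q ∈ update, q ∈ ((PySem.Dict.mk adjacency_list_reversed).get? p).getD [] ↔ (q, p) ∈ pairs)))
instance (update : List Int) (pairs : List (Int × Int)) (adjacency_list : List (Int × List Int)) (adjacency_list_reversed : List (Int × List Int)) : Decidable (Pre_get_update_num update pairs adjacency_list adjacency_list_reversed) := by unfold Pre_get_update_num; exact @instDecidableOr _ _ (by infer_instance) (by infer_instance)

def pvWitness_get_update_num : List Int × (List (Int × Int)) × (List (Int × List Int)) × (List (Int × List Int)) :=
  ([1, 2], [(2, 1)], [(1, []), (2, [1])], [(1, [2]), (2, [])])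

def Spec_get_update_num (update : List Int) (pairs : List (Int × Int)) (adjacency_list : List (Int × List Int)) (adjacency_list_reversed : List (Int × List Int)) (out : Int) : Prop := out = get_update_num_alt update pairs adjacency_list adjacency_list_reversed
instance (update : List Int) (pairs : List (Int × Int)) (adjacency_list : List (Int × List Int)) (adjacency_list_reversed : List (Int × List Int)) (out : Int) : Decidable (Spec_get_update_num update pairs adjacency_list adjacency_list_reversed out) := by unfold Spec_get_update_num; infer_instance

-- ===== CLAIM (what is proved, stated in full; the proofs are below) =====
def Claim_equal_get_update_num : Prop := ∀ (update : List Int) (pairs : List (Int × Int)) (adjacency_list : List (Int × List Int)) (adjacency_list_reversed : List (Int × List Int)), Dom_get_update_num update pairs adjacency_list adjacency_list_reversed → Pre_get_update_num update pairs adjacency_list adjacency_list_reversed → Spec_get_update_num update pairs adjacency_list adjacency_list_reversed (get_update_num update pairs adjacency_list adjacency_list_reversed)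

-- ===== LEMMAS AND PROOFS =====

-- the "no inversion" property both validity loops test
def pvNoInv (update : List Int) (pairs : List (Int × Int)) : Prop :=
  ∀ j : Nat, j < update.length → ∀ i : Nat, i < j →
    (update.getD j 0, update.getD i 0) ∉ pairs

-- strict-total-order and dict-consistency bundles (the second disjunct of Pre_)
def pvOrd (update : List Int) (pairs : List (Int × Int)) : Prop :=
  update.Nodup ∧
  (∀ p ∈ update, (p, p) ∉ pairs) ∧
  (∀ p ∈ update, ∀ q ∈ update, p ≠ q → (p, q) ∈ pairs ∨ (q, p) ∈ pairs) ∧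
  (∀ p ∈ update, ∀ q ∈ update, ∀ r ∈ update, (p, q) ∈ pairs → (q, r) ∈ pairs → (p, r) ∈ pairs)
def pvConsS (update : List Int) (pairs : List (Int × Int)) (adjacency_list : List (Int × List Int)) : Prop :=
  ∀ p ∈ update, (((PySem.Dict.mk adjacency_list).get? p).getD []).Nodup ∧
    (∀ q ∈ update, q ∈ ((PySem.Dict.mk adjacency_list).get? p).getD [] ↔ (p, q) ∈ pairs)
def pvConsP (update : List Int) (pairs : List (Int × Int)) (adjacency_list_reversed : List (Int × List Int)) : Prop :=
  ∀ p ∈ update, (((PySem.Dict.mk adjacency_list_reversed).get? p).getD []).Nodup ∧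
    (∀ q ∈ update, q ∈ ((PySem.Dict.mk adjacency_list_reversed).get? p).getD [] ↔ (q, p) ∈ pairs)

-- successor / predecessor lists of a page inside the update, as A builds them
def pvSuccL (update : List Int) (adjacency_list : List (Int × List Int)) (p : Int) : List Int :=
  PySem.Set.inter (((PySem.Dict.mk adjacency_list).get? p).getD []) (PySem.Set.ofList update)
def pvPredL (update : List Int) (adjacency_list_reversed : List (Int × List Int)) (p : Int) : List Int :=
  PySem.Set.inter (((PySem.Dict.mk adjacency_list_reversed).get? p).getD []) (PySem.Set.ofList update)

lemma pv_foldl_pair_split {α β γ : Type} (l : List γ) (f : α → γ → α) (g : β → γ → β) (a : α) (b : β) :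
    l.foldl (fun d x => (f d.1 x, g d.2 x)) (a, b) = (l.foldl f a, l.foldl g b) := by
  induction l generalizing a b with
  | nil => rfl
  | cons x l ih => simpa using ih (f a x) (g b x)

lemma pv_inner_any (update : List Int) (pairs : List (Int × Int)) (k : Nat) (hk : k < update.length) :
    ((PySem.List.slice update (some ((k : Int) + 1)) none).any
        (fun page2 => pairs.contains (page2, update[k]))) = true
      ↔ ∃ j : Nat, k < j ∧ ∃ hj : j < update.length, (update[j], update[k]) ∈ pairs := by
  have hs : ((k : Int) + 1) = ((k + 1 : Nat) : Int) := by push_cast; ring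
  rw [hs, PySem.List.slice_from_natCast]
  rw [List.any_eq_true]
  constructor
  · rintro ⟨x, hx, hc⟩
    rw [List.mem_iff_getElem] at hx
    obtain ⟨i, hi, hx⟩ := hx
    have hlen : (List.drop (k + 1) update).length = update.length - (k + 1) := List.length_drop ..
    rw [List.getElem_drop] at hx
    refine ⟨k + 1 + i, by omega, by omega, ?_⟩
    rw [List.contains_iff_mem] at hc
    rw [hx]
    exact hc
  · rintro ⟨j, hkj, hj, hmem⟩
    have hlen : (List.drop (k + 1) update).length = update.length - (k + 1) := List.length_drop ..
    refine ⟨update[j], ?_, by rwa [List.contains_iff_mem]⟩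
    rw [List.mem_iff_getElem]
    refine ⟨j - (k + 1), by omega, ?_⟩
    rw [List.getElem_drop]
    congr 1
    omega

lemma pv_foldl_flag {α : Type} (l : List α) (c : α → Bool) (b : Bool) :
    l.foldl (fun v x => if v = false then v else if c x then false else v) b
      = (b && l.all (fun x => !c x)) := by
  induction l generalizing b with
  | nil => simp
  | cons x l ih =>
    rw [List.foldl_cons]
    cases b with
    | false => rw [if_pos rfl, ih]; simp
    | true =>
      rw [if_neg (by simp)]
      by_cases hc : c x
      · rw [if_pos hc, ih]; simp [hc]
      · rw [if_neg hc, ih]; simp [hc]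

lemma pv_avalid_iff (update : List Int) (pairs : List (Int × Int)) :
    ((PySem.List.enumerate update).foldl
      (fun valid ip =>
        if valid = false then valid
        else if (PySem.List.slice update (some (ip.1 + 1)) none).any
                 (fun page2 => pairs.contains (page2, ip.2)) then false
        else valid)
      true) = true ↔ pvNoInv update pairs := by
  rw [pv_foldl_flag]
  simp only [Bool.true_and, List.all_eq_true, pvNoInv]
  constructor
  · intro h j hj i hij
    have hi : i < update.length := Nat.lt_trans hij hj
    have hmem : ((i : Int), update[i]) ∈ PySem.List.enumerate update := by
      rw [PySem.List.mem_enumerate_iff]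
      exact ⟨i, hi, by simp⟩
    have h2 := h _ hmem
    rw [Bool.not_eq_eq_eq_not, Bool.not_true, ← Bool.not_eq_true] at h2
    rw [List.getD_eq_getElem update 0 hj, List.getD_eq_getElem update 0 hi]
    intro hmem2
    exact h2 ((pv_inner_any update pairs i hi).2 ⟨j, hij, hj, hmem2⟩)
  · intro h ip hip
    rw [PySem.List.mem_enumerate_iff] at hip
    obtain ⟨k, hk, rfl⟩ := hip
    simp only [zero_add]
    rw [Bool.not_eq_eq_eq_not, Bool.not_true, ← Bool.not_eq_true]
    intro hany
    obtain ⟨j, hkj, hj, hmem⟩ := (pv_inner_any update pairs k hk).1 hany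
    exact h j hj k hkj (by rw [List.getD_eq_getElem update 0 hj, List.getD_eq_getElem update 0 (Nat.lt_trans hkj hj)]; exact hmem)

lemma pv_bany_iff (update : List Int) (pairs : List (Int × Int)) :
    ((PySem.List.pyRange 0 (update.length : Int) 1).any (fun i =>
        (PySem.List.pyRange (i + 1) (update.length : Int) 1).any (fun j =>
          pairs.contains (PySem.List.pyGetD update j 0, PySem.List.pyGetD update i 0)))) = true
      ↔ ¬ pvNoInv update pairs := by
  simp only [List.any_eq_true, PySem.List.mem_pyRange_one, pvNoInv]
  constructor
  · rintro ⟨i, ⟨hi0, hin⟩, j, ⟨hij, hjn⟩, hc⟩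
    intro h
    rw [List.contains_iff_mem] at hc
    rw [PySem.List.pyGetD_eq_getElem _ _ (by omega) (by omega),
        PySem.List.pyGetD_eq_getElem _ _ (by omega) (by omega)] at hc
    exact h j.toNat (by omega) i.toNat (by omega)
      (by rw [List.getD_eq_getElem update 0 (by omega), List.getD_eq_getElem update 0 (by omega)]; exact hc)
  · intro h
    rw [not_forall] at h
    obtain ⟨j, hj⟩ := h
    rw [not_forall] at hj
    obtain ⟨hjn, hj⟩ := hj
    rw [not_forall] at hj
    obtain ⟨i, hi⟩ := hj
    rw [not_forall] at hi
    obtain ⟨hij, hmem⟩ := hi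
    rw [not_not] at hmem
    refine ⟨(i : Int), ⟨by omega, by omega⟩, (j : Int), ⟨by omega, by omega⟩, ?_⟩
    rw [List.contains_iff_mem, PySem.List.pyGetD_natCast, PySem.List.pyGetD_natCast]
    simpa using hmem

lemma pv_get?_foldl_insert (l : List Int) (f : Int → List Int) (d : PySem.Dict Int (List Int)) (k : Int) :
    (l.foldl (fun d p => d.insert p (f p)) d).get? k = if k ∈ l then some (f k) else d.get? k := by
  induction l generalizing d with
  | nil => simp
  | cons x l ih =>
    rw [List.foldl_cons, ih]
    by_cases hk : k ∈ l
    · simp [hk]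
    · by_cases hkx : k = x
      · simp [hk, hkx]
      · simp [hk, hkx, PySem.Dict.get?_insert]

lemma pv_fold_char (v : Int) (l : List Int) (hnd : l.Nodup) :
    ∀ (S0 : List Int) (al alr : PySem.Dict Int (List Int)), (∀ x ∈ l, x ∉ S0) →
    (l.foldl (pvStep v) (S0, al, alr)).1
        = S0 ++ l.filter (fun n => (PySem.Set.discard (alr.getD n []) v).length == 0) ∧
    (∀ p, (l.foldl (pvStep v) (S0, al, alr)).2.1.getD p []
        = if p = v then (al.getD v []).filter (fun x => !l.contains x) else al.getD p []) ∧
    (∀ p, (l.foldl (pvStep v) (S0, al, alr)).2.2.getD p []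
        = if p ∈ l then PySem.Set.discard (alr.getD p []) v else alr.getD p []) := by
  induction l with
  | nil => intro S0 al alr _; simp
  | cons n l ih =>
    intro S0 al alr hdisj
    obtain ⟨hn, hndl⟩ := List.nodup_cons.1 hnd
    rw [List.foldl_cons]
    have hstep : pvStep v (S0, al, alr) n =
        ((if (PySem.Set.discard (alr.getD n []) v).length = 0 then PySem.Set.add S0 n else S0),
         al.modify v [] (fun s => PySem.Set.discard s n),
         alr.modify n [] (fun s => PySem.Set.discard s v)) := by
      simp only [pvStep, PySem.Dict.getD_modify_self]
    rw [hstep]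
    have hd1 : ∀ x ∈ l, x ∉ (if (PySem.Set.discard (alr.getD n []) v).length = 0 then PySem.Set.add S0 n else S0) := by
      intro x hx
      by_cases hcond : (PySem.Set.discard (alr.getD n []) v).length = 0
      · rw [if_pos hcond]
        intro hmem
        rcases (PySem.Set.mem_add _ _ _).1 hmem with h | h
        · exact hdisj x (by simp [hx]) h
        · exact hn (h ▸ hx)
      · rw [if_neg hcond]; exact hdisj x (by simp [hx])
    obtain ⟨h1, h2, h3⟩ := ih hndl _ (al.modify v [] (fun s => PySem.Set.discard s n)) (alr.modify n [] (fun s => PySem.Set.discard s v)) hd1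
    refine ⟨?_, ?_, ?_⟩
    · rw [h1]
      have hfc : l.filter (fun m => (PySem.Set.discard ((alr.modify n [] (fun s => PySem.Set.discard s v)).getD m []) v).length == 0)
          = l.filter (fun m => (PySem.Set.discard (alr.getD m []) v).length == 0) := by
        apply List.filter_congr
        intro m hm
        rw [PySem.Dict.getD_modify_of_ne alr (k := n) (k' := m) [] _ (fun h => hn (h ▸ hm))]
      rw [hfc, List.filter_cons]
      by_cases hcond : (PySem.Set.discard (alr.getD n []) v).length = 0
      · rw [if_pos hcond, if_pos (by simpa using hcond)]
        rw [PySem.Set.add, if_neg (fun hc => hdisj n (by simp) ((PySem.Set.contains_iff _ _).1 hc))]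
        simp
      · rw [if_neg hcond, if_neg (by simpa using hcond)]
    · intro p
      rw [h2]
      by_cases hp : p = v
      · subst hp
        rw [if_pos rfl, if_pos rfl, PySem.Dict.getD_modify_self]
        simp only [PySem.Set.discard, List.filter_filter]
        apply List.filter_congr
        intro x _
        by_cases h1' : x = n <;> by_cases h2' : l.contains x <;> simp [h1']
      · rw [if_neg hp, if_neg hp]
        rcases eq_or_ne p v with h | h
        · exact absurd h hp
        · rw [PySem.Dict.getD_modify_of_ne _ _ _ h]
    · intro p
      rw [h3]
      by_cases hpl : p ∈ l
      · rw [if_pos hpl, if_pos (by simp [hpl]), PySem.Dict.getD_modify_of_ne alr (k := n) (k' := p) [] _ (fun h => hn (h ▸ hpl))]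
      · by_cases hpn : p = n
        · subst hpn
          rw [if_neg hpl, if_pos (by simp), PySem.Dict.getD_modify_self]
        · rw [if_neg hpl, if_neg (by simp [hpl, hpn]), PySem.Dict.getD_modify_of_ne _ _ _ hpn]

lemma pv_asym (update : List Int) (pairs : List (Int × Int)) (h : pvOrd update pairs)
    (p q : Int) (hp : p ∈ update) (hq : q ∈ update)
    (h1 : (p, q) ∈ pairs) (h2 : (q, p) ∈ pairs) : False :=
  h.2.1 p hp (h.2.2.2 p hp q hq p hp h1 h2)

lemma pv_exists_min (update : List Int) (pairs : List (Int × Int)) (h : pvOrd update pairs) :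
    ∀ R : List Int, (∀ x ∈ R, x ∈ update) → R ≠ [] →
      ∃ m, m ∈ R ∧ ∀ q ∈ R, (q, m) ∉ pairs := by
  intro R
  induction R with
  | nil => intro _ hne; exact absurd rfl hne
  | cons x R ih =>
    intro hsub _
    rcases eq_or_ne R [] with rfl | hne
    · refine ⟨x, by simp, ?_⟩
      intro q hq
      have hqx : q = x := by simpa using hq
      rw [hqx]
      exact h.2.1 x (hsub x (by simp))
    · obtain ⟨m, hmR, hmin⟩ := ih (fun y hy => hsub y (by simp [hy])) hne
      by_cases hxm : (x, m) ∈ pairs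
      · refine ⟨x, by simp, ?_⟩
        intro q hq hqx
        rcases List.mem_cons.1 hq with rfl | hqR
        · exact h.2.1 q (hsub q (by simp)) hqx
        · exact hmin q hqR (h.2.2.2 q (hsub q (by simp [hqR])) x (hsub x (by simp)) m
            (hsub m (by simp [hmR])) hqx hxm)
      · refine ⟨m, by simp [hmR], ?_⟩
        intro q hq
        rcases List.mem_cons.1 hq with rfl | hqR
        · exact hxm
        · exact hmin q hqR

lemma pv_min_unique (update : List Int) (pairs : List (Int × Int)) (h : pvOrd update pairs)
    (R : List Int) (hsub : ∀ x ∈ R, x ∈ update) (m m' : Int)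
    (hm : m ∈ R ∧ ∀ q ∈ R, (q, m) ∉ pairs) (hm' : m' ∈ R ∧ ∀ q ∈ R, (q, m') ∉ pairs) :
    m = m' := by
  by_contra hne
  rcases h.2.2.1 m (hsub m hm.1) m' (hsub m' hm'.1) hne with hlt | hlt
  · exact hm'.2 m hm.1 hlt
  · exact hm.2 m' hm'.1 hlt

lemma pv_succL_mem (update : List Int) (pairs : List (Int × Int)) (adjacency_list : List (Int × List Int))
    (hc : pvConsS update pairs adjacency_list) (p : Int) (hp : p ∈ update) (q : Int) :
    q ∈ pvSuccL update adjacency_list p ↔ q ∈ update ∧ (p, q) ∈ pairs := by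
  unfold pvSuccL PySem.Set.inter
  rw [List.mem_filter]
  constructor
  · rintro ⟨hval, hcon⟩
    have hqu : q ∈ update := (PySem.Set.mem_ofList _ _).1 ((PySem.Set.contains_iff _ _).1 hcon)
    exact ⟨hqu, ((hc p hp).2 q hqu).1 hval⟩
  · rintro ⟨hqu, hpq⟩
    exact ⟨((hc p hp).2 q hqu).2 hpq, (PySem.Set.contains_iff _ _).2 ((PySem.Set.mem_ofList _ _).2 hqu)⟩

lemma pv_predL_mem (update : List Int) (pairs : List (Int × Int)) (alr : List (Int × List Int))
    (hc : pvConsP update pairs alr) (p : Int) (hp : p ∈ update) (q : Int) :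
    q ∈ pvPredL update alr p ↔ q ∈ update ∧ (q, p) ∈ pairs := by
  unfold pvPredL PySem.Set.inter
  rw [List.mem_filter]
  constructor
  · rintro ⟨hval, hcon⟩
    have hqu : q ∈ update := (PySem.Set.mem_ofList _ _).1 ((PySem.Set.contains_iff _ _).1 hcon)
    exact ⟨hqu, ((hc p hp).2 q hqu).1 hval⟩
  · rintro ⟨hqu, hpq⟩
    exact ⟨((hc p hp).2 q hqu).2 hpq, (PySem.Set.contains_iff _ _).2 ((PySem.Set.mem_ofList _ _).2 hqu)⟩

lemma pv_succL_nodup (update : List Int) (pairs : List (Int × Int)) (adjacency_list : List (Int × List Int))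
    (hc : pvConsS update pairs adjacency_list) (p : Int) (hp : p ∈ update) :
    (pvSuccL update adjacency_list p).Nodup := (hc p hp).1.filter _

lemma pv_kahn_main (update : List Int) (pairs : List (Int × Int))
    (al : List (Int × List Int)) (alr : List (Int × List Int))
    (hord : pvOrd update pairs) (hcS : pvConsS update pairs al) (hcP : pvConsP update pairs alr) :
    ∀ (fuel : Nat) (R S : List Int) (AL ALR : PySem.Dict Int (List Int)) (acc : List Int),
      R.length ≤ fuel → (∀ x ∈ R, x ∈ update) → R.Nodup → S.Nodup →
      (∀ x, x ∈ S ↔ x ∈ R ∧ ∀ q ∈ R, (q, x) ∉ pairs) →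
      (∀ p, AL.getD p [] = if p ∈ R then pvSuccL update al p else []) →
      (∀ p, ALR.getD p [] = if p ∈ update then (pvPredL update alr p).filter (fun q => decide (q ∈ R)) else []) →
      (∀ q ∈ update, q ∉ R → ∀ r ∈ R, (q, r) ∈ pairs) →
      ∃ ts, pvKahn fuel S AL ALR acc = acc ++ ts ∧ ts.Perm R ∧ ts.Pairwise (fun a b => (a, b) ∈ pairs) := by
  intro fuel
  induction fuel with
  | zero =>
    intro R S AL ALR acc hfuel hsub hndR hndS hS hAL hALR hM
    have hR : R = [] := List.length_eq_zero_iff.1 (Nat.le_zero.1 hfuel)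
    subst hR
    have hSnil : S = [] := by
      rw [List.eq_nil_iff_forall_not_mem]
      intro x hx
      simpa using ((hS x).1 hx).1
    subst hSnil
    exact ⟨[], by simp [pvKahn], List.Perm.refl _, List.Pairwise.nil⟩
  | succ fuel ih =>
    intro R S AL ALR acc hfuel hsub hndR hndS hS hAL hALR hM
    rcases eq_or_ne R [] with rfl | hRne
    · have hSnil : S = [] := by
        rw [List.eq_nil_iff_forall_not_mem]
        intro x hx
        simpa using ((hS x).1 hx).1
      subst hSnil
      exact ⟨[], by simp [pvKahn], List.Perm.refl _, List.Pairwise.nil⟩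
    · -- R nonempty: S = [v] with v the minimum of R
      obtain ⟨m, hmR, hmmin⟩ := pv_exists_min update pairs hord R hsub hRne
      have hmS : m ∈ S := (hS m).2 ⟨hmR, hmmin⟩
      obtain ⟨v, S', rfl⟩ : ∃ v S', S = v :: S' := by
        cases S with
        | nil => exact absurd hmS (by simp)
        | cons v S' => exact ⟨v, S', rfl⟩
      have hvmin : v ∈ R ∧ ∀ q ∈ R, (q, v) ∉ pairs := (hS v).1 (by simp)
      have hvu : v ∈ update := hsub v hvmin.1
      have hvm : v = m := pv_min_unique update pairs hord R hsub v m hvmin ⟨hmR, hmmin⟩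
      have hS'nil : S' = [] := by
        rw [List.eq_nil_iff_forall_not_mem]
        intro x hx
        have hxS : x ∈ v :: S' := by simp [hx]
        have hxmin := (hS x).1 hxS
        have hxv : x = v := by
          rw [hvm]
          exact pv_min_unique update pairs hord R hsub x m hxmin ⟨hmR, hmmin⟩
        exact (List.nodup_cons.1 hndS).1 (hxv ▸ hx)
      subst hS'nil
      -- unfold one loop iteration
      have hout : AL.getD v [] = pvSuccL update al v := by rw [hAL v, if_pos hvmin.1]
      have hsuccnd : (pvSuccL update al v).Nodup := pv_succL_nodup update pairs al hcS v hvu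
      obtain ⟨h1, h2, h3⟩ := pv_fold_char v (pvSuccL update al v) hsuccnd [] AL ALR (by simp)
      set R' := R.erase v with hR'
      have hmemR' : ∀ x, x ∈ R' ↔ x ∈ R ∧ x ≠ v := by
        intro x
        rw [hR', hndR.mem_erase_iff]
        tauto
      have hsub' : ∀ x ∈ R', x ∈ update := fun x hx => hsub x ((hmemR' x).1 hx).1
      have hsucc_memR' : ∀ x ∈ pvSuccL update al v, x ∈ R' := by
        intro x hx
        obtain ⟨hxu, hvx⟩ := (pv_succL_mem update pairs al hcS v hvu x).1 hx
        rw [hmemR']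
        constructor
        · by_contra hxR
          exact pv_asym update pairs hord v x hvu hxu hvx (hM x hxu hxR v hvmin.1)
        · intro hxv
          exact hord.2.1 v hvu (hxv ▸ hvx)
      have hsucc_memR'' : ∀ x, x ∈ pvSuccL update al v ↔ x ∈ update ∧ (v, x) ∈ pairs :=
        fun x => pv_succL_mem update pairs al hcS v hvu x
      -- new S after the fold: exactly the minima of R'
      have hS1 : ∀ x, x ∈ (List.foldl (pvStep v) ([], AL, ALR) (pvSuccL update al v)).1 ↔
          (x ∈ R' ∧ ∀ q ∈ R', (q, x) ∉ pairs) := by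
        intro x
        rw [h1]
        simp only [List.nil_append, List.mem_filter]
        constructor
        · rintro ⟨hxs, hcond⟩
          have hxR' := hsucc_memR' x hxs
          refine ⟨hxR', ?_⟩
          intro q hq hqx
          have hqu : q ∈ update := hsub' q hq
          have : q ∈ PySem.Set.discard (ALR.getD x []) v := by
            unfold PySem.Set.discard
            rw [List.mem_filter]
            refine ⟨?_, by
              simp only [Bool.not_eq_eq_eq_not, Bool.not_true, beq_eq_false_iff_ne, ne_eq]
              exact fun h => ((hmemR' q).1 hq).2 h⟩
            rw [hALR x, if_pos (hsub' x hxR'), List.mem_filter]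
            exact ⟨(pv_predL_mem update pairs alr hcP x (hsub' x hxR') q).2 ⟨hqu, hqx⟩,
              by simp [((hmemR' q).1 hq).1]⟩
          rw [beq_iff_eq, List.length_eq_zero_iff, List.eq_nil_iff_forall_not_mem] at hcond
          exact hcond q this
        · rintro ⟨hxR', hxmin⟩
          have hxu := hsub' x hxR'
          have hxR : x ∈ R := ((hmemR' x).1 hxR').1
          have hxv : x ≠ v := ((hmemR' x).1 hxR').2
          have hvx : (v, x) ∈ pairs := by
            rcases hord.2.2.1 v hvu x hxu (fun h => hxv h.symm) with h | h
            · exact h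
            · exact absurd h (hvmin.2 x hxR)
          refine ⟨(hsucc_memR'' x).2 ⟨hxu, hvx⟩, ?_⟩
          simp only [beq_iff_eq]
          rw [List.length_eq_zero_iff, List.eq_nil_iff_forall_not_mem]
          intro q hq
          unfold PySem.Set.discard at hq
          rw [List.mem_filter] at hq
      -- wait: need to derive contradiction: q ∈ ALR.getD x [] with q ≠ v
          obtain ⟨hq1, hq2⟩ := hq
          rw [hALR x, if_pos hxu, List.mem_filter] at hq1
          obtain ⟨hqpred, hqR⟩ := hq1
          have hqu_and := (pv_predL_mem update pairs alr hcP x hxu q).1 hqpred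
          have hqR' : q ∈ R' := (hmemR' q).2 ⟨by simpa using hqR, by
            simpa [beq_eq_false_iff_ne] using hq2⟩
          exact hxmin q hqR' hqu_and.2
      have hndS1 : (List.foldl (pvStep v) ([], AL, ALR) (pvSuccL update al v)).1.Nodup := by
        rw [h1]
        simpa using hsuccnd.filter _
      have hAL1 : ∀ p, (List.foldl (pvStep v) ([], AL, ALR) (pvSuccL update al v)).2.1.getD p []
          = if p ∈ R' then pvSuccL update al p else [] := by
        intro p
        rw [h2 p]
        by_cases hp : p = v
        · subst hp
          rw [if_pos rfl, if_neg (fun h => ((hmemR' p).1 h).2 rfl), hout, List.filter_eq_nil_iff]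
          intro a ha
          simpa using (PySem.Set.contains_iff (pvSuccL update al p) a).2 ha
        · rw [if_neg hp, hAL p]
          by_cases hpR : p ∈ R
          · rw [if_pos hpR, if_pos ((hmemR' p).2 ⟨hpR, hp⟩)]
          · rw [if_neg hpR, if_neg (fun h => hpR ((hmemR' p).1 h).1)]
      have hALR1 : ∀ p, (List.foldl (pvStep v) ([], AL, ALR) (pvSuccL update al v)).2.2.getD p []
          = if p ∈ update then (pvPredL update alr p).filter (fun q => decide (q ∈ R')) else [] := by
        intro p
        rw [h3 p]
        by_cases hps : p ∈ pvSuccL update al v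
        · have hpu : p ∈ update := ((hsucc_memR'' p).1 hps).1
          rw [if_pos hps, if_pos hpu, hALR p, if_pos hpu]
          unfold PySem.Set.discard
          rw [List.filter_filter]
          apply List.filter_congr
          intro q hq
          by_cases hqv : q = v
          · subst hqv
            have hnotR' : q ∉ R' := fun h => ((hmemR' q).1 h).2 rfl
            simp [hnotR']
          · by_cases hqR : q ∈ R
            · have hinR' : q ∈ R' := (hmemR' q).2 ⟨hqR, hqv⟩
              simp [hqR, hqv, hinR']
            · have hnotR' : q ∉ R' := fun h => hqR ((hmemR' q).1 h).1
              simp [hqR, hnotR']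
        · rw [if_neg hps, hALR p]
          by_cases hpu : p ∈ update
          · rw [if_pos hpu, if_pos hpu]
            apply List.filter_congr
            intro q hq
            have hqdata := (pv_predL_mem update pairs alr hcP p hpu q).1 hq
            by_cases hqv : q = v
            · subst hqv
              exact absurd ((hsucc_memR'' p).2 ⟨hpu, hqdata.2⟩) hps
            · by_cases hqR : q ∈ R
              · have hinR' : q ∈ R' := (hmemR' q).2 ⟨hqR, hqv⟩
                simp [hqR, hinR']
              · have hnotR' : q ∉ R' := fun h => hqR ((hmemR' q).1 h).1
                simp [hqR, hnotR']
          · rw [if_neg hpu, if_neg hpu]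
      have hM1 : ∀ q ∈ update, q ∉ R' → ∀ r ∈ R', (q, r) ∈ pairs := by
        intro q hqu hqR' r hrR'
        have hru := hsub' r hrR'
        have hrR : r ∈ R := ((hmemR' r).1 hrR').1
        by_cases hqR : q ∈ R
        · have hqv : q = v := by
            by_contra hqv
            exact hqR' ((hmemR' q).2 ⟨hqR, hqv⟩)
          subst hqv
          rcases hord.2.2.1 q hqu r hru (fun h => ((hmemR' r).1 hrR').2 h.symm) with h | h
          · exact h
          · exact absurd h (hvmin.2 r hrR)
        · exact hM q hqu hqR r hrR
      have hfuel' : R'.length ≤ fuel := by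
        have hlen : R'.length = R.length - 1 := by rw [hR', List.length_erase_of_mem hvmin.1]
        have hpos : 0 < R.length := List.length_pos_iff.2 hRne
        omega
      obtain ⟨ts', hts'_eq, hts'_perm, hts'_pw⟩ := ih R'
        (List.foldl (pvStep v) ([], AL, ALR) (pvSuccL update al v)).1
        (List.foldl (pvStep v) ([], AL, ALR) (pvSuccL update al v)).2.1
        (List.foldl (pvStep v) ([], AL, ALR) (pvSuccL update al v)).2.2
        (acc ++ [v]) hfuel' hsub' (hndR.erase v) hndS1 hS1 hAL1 hALR1 hM1
      refine ⟨v :: ts', ?_, ?_, ?_⟩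
      · show pvKahn (fuel + 1) (v :: []) AL ALR acc = acc ++ (v :: ts')
        rw [pvKahn]
        rw [hout]
        rw [hts'_eq]
        simp
      · exact (hts'_perm.cons v).trans (List.perm_cons_erase hvmin.1).symm
      · refine List.Pairwise.cons ?_ hts'_pw
        intro x hx
        have hxR' : x ∈ R' := (hts'_perm.mem_iff).1 hx
        have hxu := hsub' x hxR'
        rcases hord.2.2.1 v hvu x hxu (fun h => ((hmemR' x).1 hxR').2 h.symm) with h | h
        · exact h
        · exact absurd h (hvmin.2 x ((hmemR' x).1 hxR').1)

lemma pv_countP_split (ts : List Int) (P : Int → Bool) (k : Nat) (hk : k < ts.length)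
    (hbefore : ∀ i : Nat, (hi : i < k) → P (ts[i]'(by omega)) = true)
    (hafter : ∀ j : Nat, (hj : j < ts.length) → k ≤ j → P (ts[j]) = false) :
    ts.countP P = k := by
  have hsplit : ts = ts.take k ++ ts.drop k := (List.take_append_drop k ts).symm
  have hdrop : ts.drop k = ts[k] :: ts.drop (k + 1) := List.drop_eq_getElem_cons hk
  calc ts.countP P = (ts.take k).countP P + (ts.drop k).countP P := by
        conv_lhs => rw [hsplit]
        rw [List.countP_append]
    _ = k + 0 := by
        congr 1
        · rw [show (ts.take k).countP P = (ts.take k).length from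
            List.countP_eq_length.2 (by
              intro a ha
              rw [List.mem_take_iff_getElem] at ha
              obtain ⟨j, hj, rfl⟩ := ha
              exact hbefore j (by omega))]
          rw [List.length_take]
          omega
        · rw [List.countP_eq_zero]
          intro a ha
          rw [hdrop] at ha
          rcases List.mem_cons.1 ha with rfl | ha'
          · simp [hafter k hk le_rfl]
          · have hlen : (ts.drop (k + 1)).length = ts.length - (k + 1) := List.length_drop ..
            rw [List.mem_iff_getElem] at ha'
            obtain ⟨i, hi, rfl⟩ := ha'
            rw [List.getElem_drop]
            simp [hafter (k + 1 + i) (by omega) (by omega)]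
    _ = k := by omega

lemma pv_find_unique (l : List Int) (p : Int → Bool) (e : Int) (he : e ∈ l)
    (hiff : ∀ x ∈ l, p x = true ↔ x = e) : l.find? p = some e := by
  induction l with
  | nil => exact absurd he (by simp)
  | cons x l ih =>
    rw [List.find?_cons]
    by_cases hx : p x = true
    · rw [hx]
      simp [(hiff x (by simp)).1 hx]
    · rw [Bool.not_eq_true] at hx
      rw [hx]
      have hxe : x ≠ e := fun h => by
        rw [← Bool.not_eq_true] at hx
        exact hx ((hiff x (by simp)).2 h)
      have he' : e ∈ l := by
        rcases List.mem_cons.1 he with h | h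
        · exact absurd h.symm hxe
        · exact h
      exact ih he' (fun y hy => hiff y (by simp [hy]))

-- initial dictionaries as built by A's first loop
lemma pv_build_eq (update : List Int) (al alr : List (Int × List Int)) :
    pvBuild update al alr =
      (update.foldl (fun d page => d.insert page (pvSuccL update al page)) PySem.Dict.empty,
       update.foldl (fun d page => d.insert page (pvPredL update alr page)) PySem.Dict.empty) := by
  rw [← pv_foldl_pair_split update
    (fun d1 page => d1.insert page (pvSuccL update al page))
    (fun d2 page => d2.insert page (pvPredL update alr page))
    PySem.Dict.empty PySem.Dict.empty]
  rfl

lemma pv_build_fst_get? (update : List Int) (al alr : List (Int × List Int)) (p : Int) :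
    (pvBuild update al alr).1.get? p = if p ∈ update then some (pvSuccL update al p) else none := by
  rw [pv_build_eq, pv_get?_foldl_insert]
  by_cases hp : p ∈ update <;> simp [hp]

lemma pv_build_snd_get? (update : List Int) (al alr : List (Int × List Int)) (p : Int) :
    (pvBuild update al alr).2.get? p = if p ∈ update then some (pvPredL update alr p) else none := by
  rw [pv_build_eq, pv_get?_foldl_insert]
  by_cases hp : p ∈ update <;> simp [hp]

lemma pv_build_fst_getD (update : List Int) (al alr : List (Int × List Int)) (p : Int) :
    (pvBuild update al alr).1.getD p [] = if p ∈ update then pvSuccL update al p else [] := by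
  rw [PySem.Dict.getD_eq_get?_getD, pv_build_fst_get?]
  by_cases hp : p ∈ update <;> simp [hp]

lemma pv_build_snd_getD (update : List Int) (al alr : List (Int × List Int)) (p : Int) :
    (pvBuild update al alr).2.getD p [] = if p ∈ update then pvPredL update alr p else [] := by
  rw [PySem.Dict.getD_eq_get?_getD, pv_build_snd_get?]
  by_cases hp : p ∈ update <;> simp [hp]

lemma pv_build_fst_mem_keys (update : List Int) (al alr : List (Int × List Int)) (x : Int) :
    x ∈ (pvBuild update al alr).1.keys ↔ x ∈ update := by
  constructor
  · intro hx
    by_contra hxu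
    have h := (PySem.Dict.get?_eq_none_iff_not_mem_keys ((pvBuild update al alr).1) x).1
      (by rw [pv_build_fst_get?, if_neg hxu])
    exact h hx
  · intro hx
    by_contra hk
    have h := (PySem.Dict.get?_eq_none_iff_not_mem_keys ((pvBuild update al alr).1) x).2 hk
    rw [pv_build_fst_get?, if_pos hx] at h
    simp at h

theorem get_update_num_spec : Claim_equal_get_update_num := by
  intro update pairs adjacency_list adjacency_list_reversed _hdom hpre
  unfold Spec_get_update_num
  by_cases hv : pvAValid update pairs = true
  · -- still-valid update: both programs return 0 via the same inversion test
    have hnoinv := (pv_avalid_iff update pairs).1 hv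
    have hany : ((PySem.List.pyRange 0 (update.length : Int) 1).any (fun i =>
        (PySem.List.pyRange (i + 1) (update.length : Int) 1).any (fun j =>
          pairs.contains (PySem.List.pyGetD update j 0, PySem.List.pyGetD update i 0)))) = false := by
      rw [← Bool.not_eq_true]
      intro h
      exact (pv_bany_iff update pairs).1 h hnoinv
    unfold get_update_num get_update_num_alt
    rw [if_pos hv]
    simp only []
    rw [hany]
    simp
  · -- invalid update: A runs Kahn's algorithm, B picks the page of rank n/2
    have hnoinv : ¬ pvNoInv update pairs := fun h => hv ((pv_avalid_iff update pairs).2 h)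
    rcases hpre with h | h
    · exact absurd h hnoinv
    obtain ⟨hnd, hirr, htot, htrans, hcs', hcp'⟩ := h
    have hord : pvOrd update pairs := ⟨hnd, hirr, htot, htrans⟩
    have hcS : pvConsS update pairs adjacency_list := fun p hp => ⟨(hcs' p hp).2.1, (hcs' p hp).2.2⟩
    have hcP : pvConsP update pairs adjacency_list_reversed := fun p hp => ⟨(hcp' p hp).2.1, (hcp' p hp).2.2⟩
    have hn2 : 2 ≤ update.length := by
      by_contra hlt
      exact hnoinv (fun j hj i hij => absurd hj (by omega))
    -- the initial state of the while loop
    have hS0mem : ∀ x, x ∈ PySem.Set.ofList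
        (((pvBuild update adjacency_list adjacency_list_reversed).1.keys).filter
          (fun v => ((pvBuild update adjacency_list adjacency_list_reversed).2.getD v []).length == 0))
        ↔ x ∈ update ∧ ∀ q ∈ update, (q, x) ∉ pairs := by
      intro x
      rw [PySem.Set.mem_ofList, List.mem_filter, pv_build_fst_mem_keys]
      constructor
      · rintro ⟨hxu, hcond⟩
        refine ⟨hxu, ?_⟩
        rw [pv_build_snd_getD, if_pos hxu, beq_iff_eq, List.length_eq_zero_iff,
          List.eq_nil_iff_forall_not_mem] at hcond
        intro q hq hmem
        exact hcond q ((pv_predL_mem update pairs adjacency_list_reversed hcP x hxu q).2 ⟨hq, hmem⟩)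
      · rintro ⟨hxu, hmin⟩
        refine ⟨hxu, ?_⟩
        rw [pv_build_snd_getD, if_pos hxu, beq_iff_eq, List.length_eq_zero_iff,
          List.eq_nil_iff_forall_not_mem]
        intro q hq
        have := (pv_predL_mem update pairs adjacency_list_reversed hcP x hxu q).1 hq
        exact hmin q this.1 this.2
    have hALR0 : ∀ p, (pvBuild update adjacency_list adjacency_list_reversed).2.getD p []
        = if p ∈ update then (pvPredL update adjacency_list_reversed p).filter (fun q => decide (q ∈ update)) else [] := by
      intro p
      rw [pv_build_snd_getD]
      by_cases hp : p ∈ update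
      · rw [if_pos hp, if_pos hp, List.filter_eq_self.2]
        intro a ha
        simpa using ((pv_predL_mem update pairs adjacency_list_reversed hcP p hp a).1 ha).1
      · rw [if_neg hp, if_neg hp]
    obtain ⟨ts, hts_eq, hts_perm, hts_pw⟩ :=
      pv_kahn_main update pairs adjacency_list adjacency_list_reversed hord hcS hcP
        (update.length + 1) update
        (PySem.Set.ofList
          (((pvBuild update adjacency_list adjacency_list_reversed).1.keys).filter
            (fun v => ((pvBuild update adjacency_list adjacency_list_reversed).2.getD v []).length == 0)))
        (pvBuild update adjacency_list adjacency_list_reversed).1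
        (pvBuild update adjacency_list adjacency_list_reversed).2
        [] (by omega) (fun x hx => hx) hnd (PySem.Set.nodup_ofList _) hS0mem
        (fun p => pv_build_fst_getD update adjacency_list adjacency_list_reversed p)
        hALR0 (fun q hq hq' => absurd hq hq')
    have hlen : ts.length = update.length := hts_perm.length_eq
    have hnd_ts : ts.Nodup := hts_perm.nodup_iff.2 hnd
    have hhalf : update.length / 2 < ts.length := by omega
    have hsubts : ∀ {x}, x ∈ ts → x ∈ update := fun hx => hts_perm.subset hx
    -- rank of position j in the sorted list is j
    have hcount : ∀ j, (hj : j < ts.length) →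
        (update.filter (fun q => pairs.contains (q, ts[j]))).length = j := by
      intro j hj
      rw [← List.countP_eq_length_filter, ← hts_perm.countP_eq]
      have hpwg := List.pairwise_iff_getElem.1 hts_pw
      apply pv_countP_split ts _ j hj
      · intro i hi
        rw [List.contains_iff_mem]
        exact hpwg i j (by omega) hj (by omega)
      · intro j' hj' hjj'
        rw [← Bool.not_eq_true, List.contains_iff_mem]
        rcases Nat.eq_or_lt_of_le hjj' with rfl | hlt
        · exact hirr _ (hsubts (List.getElem_mem _))
        · intro hmem
          exact pv_asym update pairs hord _ _ (hsubts (List.getElem_mem _)) (hsubts (List.getElem_mem _))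
            (hpwg j j' hj hj' hlt) hmem
    -- evaluate A
    unfold get_update_num
    rw [if_neg hv]
    simp only []
    rw [hts_eq, List.nil_append]
    have h2 : ((2 : Nat) : Int) = (2 : Int) := by norm_num
    have hAv : PySem.List.pyGetD ts (PySem.Int.floordiv (update.length : Int) 2) 0
        = ts[update.length / 2] := by
      rw [← h2, PySem.Int.floordiv_natCast, PySem.List.pyGetD_natCast,
        List.getD_eq_getElem _ _ hhalf]
    -- evaluate B
    have hbany : ((PySem.List.pyRange 0 (update.length : Int) 1).any (fun i =>
        (PySem.List.pyRange (i + 1) (update.length : Int) 1).any (fun j =>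
          pairs.contains (PySem.List.pyGetD update j 0, PySem.List.pyGetD update i 0)))) = true :=
      (pv_bany_iff update pairs).2 hnoinv
    unfold get_update_num_alt
    simp only []
    rw [hbany]
    simp only [Bool.not_true, Bool.false_eq_true, if_false]
    have hfind : update.find? (fun page =>
        ((update.filter (fun q => pairs.contains (q, page))).length : Int)
          == PySem.Int.floordiv (update.length : Int) 2) = some (ts[update.length / 2]) := by
      apply pv_find_unique update _ _ (hsubts (List.getElem_mem _))
      intro x hx
      obtain ⟨j, hj, rfl⟩ := List.mem_iff_getElem.1 (hts_perm.mem_iff.2 hx)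
      rw [← h2, PySem.Int.floordiv_natCast, hcount j hj, beq_iff_eq, Int.natCast_inj]
      exact ⟨fun hje => by subst hje; rfl, fun he => (List.Nodup.getElem_inj_iff hnd_ts).1 he⟩
    rw [hfind, hAv]
    rfl
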